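-- pv_equiv track=rewrite | github.com/abhinav-gautam/leetcode | Topicwise/Strings/3856. Trim Trailing Vowels.py | trimTrailingVowels
-- ===== SOURCE A (Python) =====
-- def trimTrailingVowels(s: str) -> str:
--     lastConsonant = len(s) - 1
--     vowels = ["a", "e", "i", "o", "u"]
--
--     for i in range(len(s) - 1, -1, -1):
--         if s[i] in vowels:
--             lastConsonant -= 1
--         else:
--             break
--     return s[: lastConsonant + 1]
-- ===== SOURCE B (Python) =====
-- def trimTrailingVowels(s: str) -> str:
--     # single forward pass: remember the cut point just after the last consonant seen
--     keep = 0
--     for i, c in enumerate(s):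
--         if c not in "aeiou":
--             keep = i + 1
--     return s[:keep]
-- ===== Notes on version B (the rewrite author's own statement) =====
-- stated objective: alternative
-- what changed: Replaces A's backward scan with break and a lastConsonant counter by a single forward pass over the whole string that records the cut point just after each consonant, then slices once.
import Mathlib
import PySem

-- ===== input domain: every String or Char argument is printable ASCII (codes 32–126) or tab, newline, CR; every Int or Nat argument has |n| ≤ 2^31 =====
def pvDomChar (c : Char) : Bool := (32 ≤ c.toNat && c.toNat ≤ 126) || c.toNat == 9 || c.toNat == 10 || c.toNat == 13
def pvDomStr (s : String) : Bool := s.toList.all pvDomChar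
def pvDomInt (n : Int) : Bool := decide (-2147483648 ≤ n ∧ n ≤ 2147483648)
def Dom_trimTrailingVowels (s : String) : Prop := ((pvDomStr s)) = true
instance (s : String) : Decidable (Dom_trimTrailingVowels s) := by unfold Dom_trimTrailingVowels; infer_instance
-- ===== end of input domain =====

-- B replaces A's backward scan-with-break by one forward pass recording the cut point after
-- the last consonant (alternative decomposition; same cost).

-- ===== PORT A =====
-- the for-loop over range(len(s)-1, -1, -1) with break: recursion over the index list,
-- carrying the lastConsonant accumulator; break = returning the accumulator
def trimLoopA (cs : List Char) (vowels : List Char) (idxs : List Int) (lastConsonant : Int) : Int :=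
  match idxs with
  | [] => lastConsonant
  | i :: rest =>
    if vowels.contains (PySem.List.pyGetD cs i 'a') then
      trimLoopA cs vowels rest (lastConsonant - 1)
    else lastConsonant

def trimTrailingVowels (s : String) : String :=
  let cs := s.toList
  let lastConsonant := PySem.List.len cs - 1
  let vowels : List Char := ['a', 'e', 'i', 'o', 'u']
  let res := trimLoopA cs vowels (PySem.List.pyRange (PySem.List.len cs - 1) (-1) (-1)) lastConsonant
  String.ofList (PySem.List.slice cs none (some (res + 1)))

-- ===== PORT B =====
-- forward loop 'for i, c in enumerate(s)' as a foldl over PySem.List.enumerate,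
-- carrying the keep accumulator; final s[:keep] as a slice
def trimTrailingVowels_alt (s : String) : String :=
  let keep := (PySem.List.enumerate s.toList 0).foldl
    (fun keep p => if ("aeiou".toList).contains p.2 then keep else p.1 + 1) 0
  String.ofList (PySem.List.slice s.toList none (some keep))

-- ===== PRECONDITION & SPEC =====
def Spec_trimTrailingVowels (s : String) (out : String) : Prop := out = trimTrailingVowels_alt s
instance (s : String) (out : String) : Decidable (Spec_trimTrailingVowels s out) := by unfold Spec_trimTrailingVowels; infer_instance

-- ===== CLAIM =====
def Claim_equal_trimTrailingVowels : Prop := ∀ (s : String), Dom_trimTrailingVowels s → Spec_trimTrailingVowels s (trimTrailingVowels s)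

-- ===== LEMMAS AND PROOFS =====

-- vow c: "c is a vowel" shared by both characterizations
def pvVow (c : Char) : Bool := (['a', 'e', 'i', 'o', 'u'] : List Char).contains c

-- length of the trailing vowel run
def pvRun (cs : List Char) : Nat := (cs.reverse.takeWhile pvVow).length

theorem pvRun_le (cs : List Char) : pvRun cs ≤ cs.length := by
  have h := (List.takeWhile_sublist pvVow (l := cs.reverse)).length_le
  simpa [pvRun] using h

theorem pvRun_cons (c : Char) (cs : List Char) :
    pvRun (c :: cs) = if pvRun cs = cs.length then (if pvVow c then cs.length + 1 else cs.length)
      else pvRun cs := by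
  simp only [pvRun, List.reverse_cons, List.takeWhile_append]
  by_cases hall : (cs.reverse.takeWhile pvVow).length = cs.reverse.length
  · by_cases hv : pvVow c <;>
      simp [hall, hv]
  · simp only [List.length_reverse] at hall ⊢
    simp [hall]

-- B's forward loop computes len - run (as an offset from i, unless everything so far is vowels)
theorem trimLoopB_eq (cs : List Char) (i k : Int) :
    (PySem.List.enumerate cs i).foldl
      (fun keep p => if (['a', 'e', 'i', 'o', 'u'] : List Char).contains p.2 then keep else p.1 + 1) k
    = if pvRun cs = cs.length then k else i + cs.length - (pvRun cs : Int) := by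
  induction cs generalizing i k with
  | nil => simp [PySem.List.enumerate_nil, pvRun]
  | cons c cs ih =>
    rw [PySem.List.enumerate_cons, List.foldl_cons]
    have hstep : (if (['a', 'e', 'i', 'o', 'u'] : List Char).contains (i, c).2 = true
        then k else (i, c).1 + 1) = if pvVow c = true then k else i + 1 := rfl
    rw [hstep, ih, pvRun_cons]
    have hle := pvRun_le cs
    simp only [List.length_cons]
    split_ifs <;> push_cast <;> omega

-- A's loop counts the trailing vowels of the first m characters
theorem trimLoopA_eq (cs : List Char) (m : Nat) (hm : m ≤ cs.length) :
    trimLoopA cs ['a', 'e', 'i', 'o', 'u'] (PySem.List.pyRange ((m : Int) - 1) (-1) (-1)) ((m : Int) - 1)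
      = (m : Int) - 1 - (pvRun (cs.take m) : Int) := by
  induction m with
  | zero =>
    rw [PySem.List.pyRange_neg_one_eq_nil (by omega)]
    simp [trimLoopA, pvRun]
  | succ m ih =>
    have hm' : m < cs.length := by omega
    rw [show ((m + 1 : Nat) : Int) - 1 = (m : Int) by push_cast; ring,
        PySem.List.pyRange_neg_one_cons (by omega)]
    have hget : PySem.List.pyGetD cs (m : Int) 'a' = cs[m] := by
      rw [PySem.List.pyGetD_natCast]; exact List.getD_eq_getElem cs 'a' hm'
    have htake : cs.take (m + 1) = cs.take m ++ [cs[m]] := by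
      rw [List.take_add_one]; simp [hm']
    rw [trimLoopA, hget, htake]
    simp only [pvRun, List.reverse_append, List.reverse_singleton, List.singleton_append,
      List.takeWhile_cons]
    by_cases hv : (['a', 'e', 'i', 'o', 'u'] : List Char).contains cs[m]
    · rw [if_pos hv, if_pos (show pvVow cs[m] from hv), ih (by omega)]
      simp only [pvRun, List.length_cons]
      push_cast
      ring
    · rw [if_neg hv, if_neg (show ¬ pvVow cs[m] = true from hv)]
      simp

-- both ports return take (len - run) of the character list, hence agree
theorem ports_agree (s : String) :
    trimTrailingVowels s = trimTrailingVowels_alt s := by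
  simp only [trimTrailingVowels, trimTrailingVowels_alt]
  have hpred : (fun (keep : Int) (p : Int × Char) =>
        if ("aeiou".toList).contains p.2 then keep else p.1 + 1)
      = (fun keep p => if (['a', 'e', 'i', 'o', 'u'] : List Char).contains p.2 then keep else p.1 + 1) := rfl
  have hA := trimLoopA_eq s.toList s.toList.length le_rfl
  rw [List.take_length] at hA
  rw [hpred, trimLoopB_eq, PySem.List.len_eq, hA]
  have hkeep : ((s.toList.length : Int) - 1 - (pvRun s.toList : Int)) + 1
      = if pvRun s.toList = s.toList.length then (0 : Int)
        else (0 : Int) + (s.toList.length : Int) - (pvRun s.toList : Int) := by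
    by_cases hall : pvRun s.toList = s.toList.length
    · rw [if_pos hall, hall]; omega
    · rw [if_neg hall]; omega
  rw [hkeep]

-- ===== VERDICT =====
theorem trimTrailingVowels_spec : Claim_equal_trimTrailingVowels := by
  intro s _
  unfold Spec_trimTrailingVowels
  exact ports_agree s
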